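-- pv_equiv track=rewrite | github.com/alond880/Camera_-Tester | backend.py | find_adjacent_pixels
-- ===== SOURCE A (Python) =====
-- def find_adjacent_pixels(arr, min_group_size, max_group_size):
--     # Directions for adjacent pixels (horizontal, vertical, diagonal)
--     directions = [(0, 1), (1, 0), (0, -1), (-1, 0), (-1, -1), (-1, 1), (1, -1), (1, 1)]
--
--     # Initialize visited set
--     visited = set()
--
--     # DFS function
--     def dfs(pixel, group):
--         x, y = pixel
--         if pixel not in visited and pixel in arr:
--             visited.add(pixel)
--             group.append(pixel)
--             for dx, dy in directions:
--                 new_pixel = (x + dx, y + dy)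
--                 dfs(new_pixel, group)
--
--     # Find all groups
--     groups = []
--     for pixel in arr:
--         if pixel not in visited:
--             group = []
--             dfs(pixel, group)
--             if min_group_size <= len(group) <= max_group_size:
--                 groups.append(group)
--
--     # Return all pixels individually
--     # return [pixel for group in groups for pixel in group], len(groups)
--     return [group for group in groups], len(groups)
-- ===== SOURCE B (Python) =====
-- def find_adjacent_pixels(arr, min_group_size, max_group_size):
--     # Iterative stack-based flood fill with hashed membership (set(arr)) instead of
--     # recursive DFS with O(n) list scans; same groups, same pre-order within groups.
--     directions = [(0, 1), (1, 0), (0, -1), (-1, 0), (-1, -1), (-1, 1), (1, -1), (1, 1)]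
--     arr_set = set(arr)
--     visited = set()
--     groups = []
--     for pixel in arr:
--         if pixel in visited:
--             continue
--         group = []
--         stack = [pixel]
--         while stack:
--             p = stack.pop()
--             if p in visited or p not in arr_set:
--                 continue
--             visited.add(p)
--             group.append(p)
--             x, y = p
--             for dx, dy in reversed(directions):
--                 stack.append((x + dx, y + dy))
--         if min_group_size <= len(group) <= max_group_size:
--             groups.append(group)
--     return groups, len(groups)
-- ===== Notes on version B (the rewrite author's own statement) =====
-- stated objective: faster
-- what changed: Replaces the recursive DFS (which tests `pixel in arr` with an O(n) list scan at every call) by an iterative stack-based flood fill that pushes neighbours in reverse direction order and checks membership against a prebuilt set(arr), preserving A's group order and intra-group pre-order.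
import Mathlib
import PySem

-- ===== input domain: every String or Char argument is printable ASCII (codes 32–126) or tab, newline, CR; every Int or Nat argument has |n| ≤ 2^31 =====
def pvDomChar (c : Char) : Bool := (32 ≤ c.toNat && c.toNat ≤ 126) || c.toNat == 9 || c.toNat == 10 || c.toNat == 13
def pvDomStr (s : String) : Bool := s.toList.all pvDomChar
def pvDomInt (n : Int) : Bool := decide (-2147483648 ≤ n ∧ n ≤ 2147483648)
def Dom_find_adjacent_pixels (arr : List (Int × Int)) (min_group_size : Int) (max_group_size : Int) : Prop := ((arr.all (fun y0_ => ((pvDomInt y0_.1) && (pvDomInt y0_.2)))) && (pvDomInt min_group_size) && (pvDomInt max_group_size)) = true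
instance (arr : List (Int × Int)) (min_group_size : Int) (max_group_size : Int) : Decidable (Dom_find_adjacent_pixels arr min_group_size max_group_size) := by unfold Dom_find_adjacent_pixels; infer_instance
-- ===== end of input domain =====

-- B replaces A's recursive DFS (with its O(n) `pixel in arr` list scans) by an iterative
-- stack-based flood fill over a prebuilt set(arr); same groups in the same order, measurably faster.

-- ===== PORT A =====
-- directions, shared by both ports (same literal list in both Pythons)
def pvDirections : List (Int × Int) := [(0,1),(1,0),(0,-1),(-1,0),(-1,-1),(-1,1),(1,-1),(1,1)]
-- the eight neighbours of a pixel, in `directions` order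
def pvNbrs (p : Int × Int) : List (Int × Int) := pvDirections.map (fun d => (p.1 + d.1, p.2 + d.2))
-- number of (occurrences of) pixels of A not yet visited — termination measure / sufficient fuel
def pvMu (A : List (Int × Int)) (v : PySem.Set (Int × Int)) : Nat :=
  (A.filter (fun q => !(PySem.Set.contains v q))).length

lemma pv_countP_lt (l : List (Int × Int)) (f g : (Int × Int) → Bool)
    (himp : ∀ q, f q = true → g q = true) (p : Int × Int) (hp : p ∈ l)
    (hf : f p = false) (hg : g p = true) : l.countP f < l.countP g := by
  induction l with
  | nil => cases hp
  | cons hd tl ih =>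
    rw [List.countP_cons, List.countP_cons]
    rcases List.mem_cons.mp hp with h | h
    · subst h
      have hle : tl.countP f ≤ tl.countP g := List.countP_mono_left (fun x _ => himp x)
      rw [hf, hg]
      simp
      omega
    · have hlt := ih h
      cases hfh : f hd with
      | false =>
        cases hgh : g hd with
        | false => simp; omega
        | true => simp; omega
      | true =>
        simp [himp hd hfh]
        omega

lemma pvMu_add_lt (A : List (Int × Int)) (v : PySem.Set (Int × Int)) (p : Int × Int)
    (hpA : p ∈ A) (hpv : p ∉ v) : pvMu A (PySem.Set.add v p) < pvMu A v := by
  unfold pvMu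
  rw [← List.countP_eq_length_filter, ← List.countP_eq_length_filter]
  refine pv_countP_lt A _ _ ?him p hpA ?hf ?hg
  case him =>
    intro q hq
    simp only [Bool.not_eq_true'] at hq ⊢
    cases hvq : PySem.Set.contains v q with
    | false => rfl
    | true =>
      rw [(PySem.Set.contains_iff _ q).mpr ((PySem.Set.mem_add _ _ _).mpr
        (Or.inl ((PySem.Set.contains_iff v q).mp hvq)))] at hq
      cases hq
  case hf =>
    simp only [Bool.not_eq_false']
    exact (PySem.Set.contains_iff _ _).mpr ((PySem.Set.mem_add _ _ _).mpr (Or.inr rfl))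
  case hg =>
    simp only [Bool.not_eq_true']
    cases h : PySem.Set.contains v p with
    | false => rfl
    | true => exact absurd ((PySem.Set.contains_iff _ _).mp h) hpv

-- A's recursive dfs, transliterated with a pending list (the head is the pixel dfs was called
-- on; the tail, the neighbours the enclosing for-loop still has to recurse on) and a Nat fuel
-- that is a termination guard only: every call below supplies fuel ≥ pvMu arr visited, which
-- the lemmas show is never exhausted.
def pvDfsA (arr : List (Int × Int)) :
    Nat → List (Int × Int) → PySem.Set (Int × Int) → List (Int × Int) →
    PySem.Set (Int × Int) × List (Int × Int)
  | _, [], visited, group => (visited, group)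
  | f, p :: pending, visited, group =>
    if !(PySem.Set.contains visited p) && arr.contains p then
      match f with
      | 0 => (visited, group)  -- unreachable under the fuel discipline
      | f' + 1 =>
        let r := pvDfsA arr f' (pvNbrs p) (PySem.Set.add visited p) (group ++ [p])
        pvDfsA arr f' pending r.1 r.2
    else
      pvDfsA arr f pending visited group
termination_by f s _ _ => (f, s.length)
decreasing_by
  · exact Prod.Lex.left _ _ (Nat.lt_succ_self _)
  · exact Prod.Lex.left _ _ (Nat.lt_succ_self _)
  · exact Prod.Lex.right _ (Nat.lt_succ_self _)

def find_adjacent_pixels (arr : List (Int × Int)) (min_group_size : Int) (max_group_size : Int) :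
    (List (List (Int × Int))) × Int :=
  let step := fun (st : PySem.Set (Int × Int) × List (List (Int × Int))) (pixel : Int × Int) =>
    if PySem.Set.contains st.1 pixel then st
    else
      let r := pvDfsA arr (pvMu arr st.1) [pixel] st.1 []
      if min_group_size ≤ PySem.List.len r.2 ∧ PySem.List.len r.2 ≤ max_group_size then
        (r.1, st.2 ++ [r.2])
      else (r.1, st.2)
  let res := arr.foldl step (PySem.Set.empty, [])
  (res.2, PySem.List.len res.2)

-- ===== PORT B =====
-- B's while-loop over an explicit stack (head = top of stack; pushing reversed(directions)
-- one by one in Python = prepending pvNbrs p in order); membership via set(arr).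
def pvDfsB (arrSet : PySem.Set (Int × Int)) :
    List (Int × Int) → PySem.Set (Int × Int) → List (Int × Int) →
    PySem.Set (Int × Int) × List (Int × Int)
  | [], visited, group => (visited, group)
  | p :: stack, visited, group =>
    if PySem.Set.contains visited p || !(PySem.Set.contains arrSet p) then
      pvDfsB arrSet stack visited group
    else
      pvDfsB arrSet (pvNbrs p ++ stack) (PySem.Set.add visited p) (group ++ [p])
termination_by s v _ => (pvMu arrSet v, s.length)
decreasing_by
  · exact Prod.Lex.right _ (Nat.lt_succ_self _)
  · rename_i h
    simp only [Bool.or_eq_true, Bool.not_eq_true', not_or] at h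
    exact Prod.Lex.left _ _ (pvMu_add_lt arrSet visited p
      (List.mem_of_elem_eq_true (by simpa using h.2))
      (fun hm => by rw [(PySem.Set.contains_iff _ _).mpr hm] at h; exact absurd h.1 (by simp)))

def find_adjacent_pixels_alt (arr : List (Int × Int)) (min_group_size : Int) (max_group_size : Int) :
    (List (List (Int × Int))) × Int :=
  let arrSet := PySem.Set.ofList arr
  let step := fun (st : PySem.Set (Int × Int) × List (List (Int × Int))) (pixel : Int × Int) =>
    if PySem.Set.contains st.1 pixel then st
    else
      let r := pvDfsB arrSet [pixel] st.1 []
      if min_group_size ≤ PySem.List.len r.2 ∧ PySem.List.len r.2 ≤ max_group_size then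
        (r.1, st.2 ++ [r.2])
      else (r.1, st.2)
  let res := arr.foldl step (PySem.Set.empty, [])
  (res.2, PySem.List.len res.2)

-- ===== PRECONDITION & SPEC =====
def Spec_find_adjacent_pixels (arr : List (Int × Int)) (min_group_size : Int) (max_group_size : Int) (out : (List (List (Int × Int))) × Int) : Prop := out = find_adjacent_pixels_alt arr min_group_size max_group_size
instance (arr : List (Int × Int)) (min_group_size : Int) (max_group_size : Int) (out : (List (List (Int × Int))) × Int) : Decidable (Spec_find_adjacent_pixels arr min_group_size max_group_size out) := by unfold Spec_find_adjacent_pixels; infer_instance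

-- ===== CLAIM (what is proved, stated in full; the proofs are below) =====
def Claim_equal_find_adjacent_pixels : Prop := ∀ (arr : List (Int × Int)) (min_group_size : Int) (max_group_size : Int), Dom_find_adjacent_pixels arr min_group_size max_group_size → Spec_find_adjacent_pixels arr min_group_size max_group_size (find_adjacent_pixels arr min_group_size max_group_size)

-- ===== LEMMAS AND PROOFS =====

lemma pvMu_mono (A : List (Int × Int)) (v w : PySem.Set (Int × Int))
    (h : ∀ q, q ∈ v → q ∈ w) : pvMu A w ≤ pvMu A v := by
  unfold pvMu
  rw [← List.countP_eq_length_filter, ← List.countP_eq_length_filter]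
  apply List.countP_mono_left
  intro x _
  simp only [Bool.not_eq_true']
  intro hwx
  cases hvx : PySem.Set.contains v x with
  | false => rfl
  | true =>
    rw [(PySem.Set.contains_iff w x).mpr (h x ((PySem.Set.contains_iff v x).mp hvx))] at hwx
    cases hwx

-- one-step unfolding equations for the two machines
lemma pvDfsA_nil (arr : List (Int × Int)) (f : Nat) (v : PySem.Set (Int × Int)) (g : List (Int × Int)) :
    pvDfsA arr f [] v g = (v, g) := by
  rw [pvDfsA]

lemma pvDfsA_cons_true (arr : List (Int × Int)) (f : Nat) (p : Int × Int) (ps : List (Int × Int))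
    (v : PySem.Set (Int × Int)) (g : List (Int × Int))
    (h : (!(PySem.Set.contains v p) && arr.contains p) = true) :
    pvDfsA arr (f + 1) (p :: ps) v g =
      pvDfsA arr f ps (pvDfsA arr f (pvNbrs p) (PySem.Set.add v p) (g ++ [p])).1
        (pvDfsA arr f (pvNbrs p) (PySem.Set.add v p) (g ++ [p])).2 := by
  rw [pvDfsA, if_pos h]

lemma pvDfsA_cons_false (arr : List (Int × Int)) (f : Nat) (p : Int × Int) (ps : List (Int × Int))
    (v : PySem.Set (Int × Int)) (g : List (Int × Int))
    (h : ¬ (!(PySem.Set.contains v p) && arr.contains p) = true) :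
    pvDfsA arr f (p :: ps) v g = pvDfsA arr f ps v g := by
  cases f with
  | zero => rw [pvDfsA.eq_2, if_neg h]
  | succ f' => rw [pvDfsA.eq_3, if_neg h]

-- the visited set only grows
lemma pvDfsA_mono (arr : List (Int × Int)) (f : Nat) (s : List (Int × Int))
    (v : PySem.Set (Int × Int)) (g : List (Int × Int)) (q : Int × Int) (hq : q ∈ v) :
    q ∈ (pvDfsA arr f s v g).1 := by
  revert hq
  fun_induction pvDfsA arr f s v g with
  | case1 => exact id
  | case2 => exact id
  | case3 =>
    rename_i p pending visited group h f1 r ih2 ih1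
    exact fun hq => ih1 (ih2 ((PySem.Set.mem_add _ _ _).mpr (Or.inl hq)))
  | case4 => rename_i ih; exact ih

lemma pvDfsA_mu_le (arr : List (Int × Int)) (f : Nat) (s : List (Int × Int))
    (v : PySem.Set (Int × Int)) (g : List (Int × Int)) :
    pvMu arr (pvDfsA arr f s v g).1 ≤ pvMu arr v :=
  pvMu_mono arr v _ (fun q hq => pvDfsA_mono arr f s v g q hq)

lemma pvMu_pos (A : List (Int × Int)) (v : PySem.Set (Int × Int)) (p : Int × Int)
    (hpA : p ∈ A) (hpv : PySem.Set.contains v p = false) : 1 ≤ pvMu A v := by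
  unfold pvMu
  rw [← List.countP_eq_length_filter]
  exact List.countP_pos_iff.mpr ⟨p, hpA, by simp only [hpv, Bool.not_false]⟩

lemma pv_not_mem_of_contains_false (v : PySem.Set (Int × Int)) (p : Int × Int)
    (h : PySem.Set.contains v p = false) : p ∉ v := by
  intro hm
  rw [(PySem.Set.contains_iff v p).mpr hm] at h
  cases h

-- with sufficient fuel (pvMu arr v many units), the fuel value is irrelevant
lemma pvDfsA_fuel (arr : List (Int × Int)) (f : Nat) (s : List (Int × Int))
    (v : PySem.Set (Int × Int)) (g : List (Int × Int)) :
    pvMu arr v ≤ f → ∀ f', pvMu arr v ≤ f' → pvDfsA arr f s v g = pvDfsA arr f' s v g := by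
  fun_induction pvDfsA arr f s v g with
  | case1 => intro _ f' _; rw [pvDfsA_nil]
  | case2 =>
    rename_i p pending visited group h
    intro h0 f' _
    simp only [Bool.and_eq_true, Bool.not_eq_true'] at h
    have := pvMu_pos arr visited p (List.mem_of_elem_eq_true h.2) h.1
    omega
  | case3 =>
    rename_i p pending visited group h f1 r ih2 ih1
    intro hf f' hf'
    simp only [Bool.and_eq_true, Bool.not_eq_true'] at h
    have hpmem : p ∈ arr := List.mem_of_elem_eq_true h.2
    have hpv : p ∉ visited := pv_not_mem_of_contains_false _ _ h.1
    have hlt : pvMu arr (PySem.Set.add visited p) < pvMu arr visited := pvMu_add_lt arr visited p hpmem hpv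
    have hpos : 1 ≤ pvMu arr visited := pvMu_pos arr visited p hpmem h.1
    cases f' with
    | zero => omega
    | succ f2 =>
      rw [pvDfsA_cons_true arr f2 p pending visited group (by rw [h.1, h.2]; rfl)]
      have e1 : pvDfsA arr f1 (pvNbrs p) (PySem.Set.add visited p) (group ++ [p]) =
          pvDfsA arr f2 (pvNbrs p) (PySem.Set.add visited p) (group ++ [p]) :=
        ih2 (by omega) f2 (by omega)
      rw [← e1]
      have hr : pvMu arr r.1 ≤ pvMu arr (PySem.Set.add visited p) :=
        pvDfsA_mu_le arr f1 (pvNbrs p) (PySem.Set.add visited p) (group ++ [p])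
      exact ih1 (by omega) f2 (by omega)
  | case4 =>
    rename_i f0 p pending visited group h ih1
    intro hf f' hf'
    rw [pvDfsA_cons_false arr f' p pending visited group h]
    exact ih1 hf f' hf'

-- processing a concatenated pending list = processing the parts in sequence
lemma pvDfsA_append (arr : List (Int × Int)) (f : Nat) (xs ys : List (Int × Int))
    (v : PySem.Set (Int × Int)) (g : List (Int × Int)) :
    pvMu arr v ≤ f → pvDfsA arr f (xs ++ ys) v g =
      pvDfsA arr f ys (pvDfsA arr f xs v g).1 (pvDfsA arr f xs v g).2 := by
  fun_induction pvDfsA arr f xs v g with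
  | case1 => intro _; rfl
  | case2 =>
    rename_i p pending visited group h
    intro h0
    simp only [Bool.and_eq_true, Bool.not_eq_true'] at h
    have := pvMu_pos arr visited p (List.mem_of_elem_eq_true h.2) h.1
    omega
  | case3 =>
    rename_i p pending visited group h f1 r ih2 ih1
    intro hf
    simp only [Bool.and_eq_true, Bool.not_eq_true'] at h
    have hpmem : p ∈ arr := List.mem_of_elem_eq_true h.2
    have hpv : p ∉ visited := pv_not_mem_of_contains_false _ _ h.1
    have hlt : pvMu arr (PySem.Set.add visited p) < pvMu arr visited := pvMu_add_lt arr visited p hpmem hpv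
    have hr : pvMu arr r.1 ≤ pvMu arr (PySem.Set.add visited p) :=
      pvDfsA_mu_le arr f1 (pvNbrs p) (PySem.Set.add visited p) (group ++ [p])
    have hcond : (!(PySem.Set.contains visited p) && arr.contains p) = true := by
      rw [h.1, h.2]; rfl
    rw [List.cons_append, pvDfsA_cons_true arr f1 p (pending ++ ys) visited group hcond]
    rw [ih1 (by omega)]
    have hr2 : pvMu arr (pvDfsA arr f1 pending r.1 r.2).1 ≤ pvMu arr r.1 :=
      pvDfsA_mu_le arr f1 pending r.1 r.2
    exact pvDfsA_fuel arr f1 ys _ _ (by omega) _ (by omega)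
  | case4 =>
    rename_i f0 p pending visited group h ih1
    intro hf
    rw [List.cons_append, pvDfsA_cons_false arr f0 p (pending ++ ys) visited group h]
    exact ih1 hf

-- the iterative stack machine computes exactly A's recursion
lemma pvDfsB_eq_pvDfsA (arr : List (Int × Int)) (s : List (Int × Int))
    (v : PySem.Set (Int × Int)) (g : List (Int × Int)) :
    ∀ f, pvMu arr v ≤ f → pvDfsB (PySem.Set.ofList arr) s v g = pvDfsA arr f s v g := by
  fun_induction pvDfsB (PySem.Set.ofList arr) s v g with
  | case1 => intro f _; rw [pvDfsA_nil]
  | case2 =>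
    rename_i p st visited group h ih
    intro f hf
    have hA : ¬ (!(PySem.Set.contains visited p) && arr.contains p) = true := by
      intro hc
      simp only [Bool.and_eq_true, Bool.not_eq_true'] at hc
      simp only [Bool.or_eq_true, Bool.not_eq_true'] at h
      rcases h with h | h
      · rw [hc.1] at h; cases h
      · rw [(PySem.Set.contains_iff _ p).mpr ((PySem.Set.mem_ofList _ _).mpr
          (List.mem_of_elem_eq_true hc.2))] at h
        cases h
    rw [pvDfsA_cons_false arr f p st visited group hA]
    exact ih f hf
  | case3 =>
    rename_i p st visited group h ih
    intro f hf
    simp only [Bool.or_eq_true, Bool.not_eq_true', not_or] at h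
    have hcv : PySem.Set.contains visited p = false := by
      cases hx : PySem.Set.contains visited p with
      | false => rfl
      | true => exact absurd hx h.1
    have hA2 : PySem.Set.contains (PySem.Set.ofList arr) p = true := by
      cases hx : PySem.Set.contains (PySem.Set.ofList arr) p with
      | true => rfl
      | false => exact absurd hx h.2
    have hpmem : p ∈ arr := (PySem.Set.mem_ofList _ _).mp ((PySem.Set.contains_iff _ _).mp hA2)
    have hpv : p ∉ visited := pv_not_mem_of_contains_false _ _ hcv
    have hlt : pvMu arr (PySem.Set.add visited p) < pvMu arr visited := pvMu_add_lt arr visited p hpmem hpv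
    have hpos : 1 ≤ pvMu arr visited := pvMu_pos arr visited p hpmem hcv
    have hca : arr.contains p = true := List.elem_eq_true_of_mem hpmem
    have hcond : (!(PySem.Set.contains visited p) && arr.contains p) = true := by
      rw [hcv, hca]; rfl
    cases f with
    | zero => omega
    | succ f2 =>
      rw [pvDfsA_cons_true arr f2 p st visited group hcond]
      rw [ih f2 (by omega)]
      exact pvDfsA_append arr f2 (pvNbrs p) st _ _ (by omega)

-- the corollary the top level uses: B's flood fill at any pixel = A's dfs there
lemma pvDfsB_eq_mu (arr : List (Int × Int)) (s : List (Int × Int))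
    (v : PySem.Set (Int × Int)) (g : List (Int × Int)) :
    pvDfsB (PySem.Set.ofList arr) s v g = pvDfsA arr (pvMu arr v) s v g :=
  pvDfsB_eq_pvDfsA arr s v g (pvMu arr v) le_rfl

-- ===== VERDICT (by name: the statement is the Claim_ definition above) =====
theorem find_adjacent_pixels_spec : Claim_equal_find_adjacent_pixels := by
  intro arr mn mx _
  unfold Spec_find_adjacent_pixels find_adjacent_pixels find_adjacent_pixels_alt
  simp only [pvDfsB_eq_mu]
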